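-- pv_equiv track=rewrite | github.com/romeorizzi/temi_prog_public | 2018.12.05.provetta/all-CMS-submissions-2018-12-05/2018-12-05.12:00:20.555213.VR429625.conta_multipli.py | conta_multipli
-- ===== SOURCE A (Python) =====
-- def conta_multipli(a, b, c):
--     risposta=0
--     n=1
--     while n<=c:
--         if n%a==0 :
--             if n%b!=0:
--                 risposta+=1
--         n=n+1
--     return risposta
-- ===== SOURCE B (Python) =====
-- # Closed form: multiples of a in 1..c minus multiples of lcm(a,b) in 1..c.
-- def conta_multipli(a, b, c):
--     if c < 1:
--         return 0
--     if b == 0: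
--         return c // abs(a)       # no n >= 1 is a multiple of 0: count all multiples of a
--     x, y = abs(a), abs(b)
--     while y:
--         x, y = y, x % y          # x = gcd(|a|, |b|)
--     l = abs(a) * abs(b) // x     # lcm(|a|, |b|)
--     return c // abs(a) - c // l
-- ===== Notes on version B (the rewrite author's own statement) =====
-- stated objective: faster
-- what changed: Replaces the O(c) loop testing every n in 1..c by the closed form floor(c/|a|) - floor(c/lcm(|a|,|b|)) with a Euclid gcd (and c//|a| when b=0); Pre_ excludes only inputs on which A raises ZeroDivisionError (a=0 with c>=1, or b=0 with c>=|a|>=1).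
import Mathlib
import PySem

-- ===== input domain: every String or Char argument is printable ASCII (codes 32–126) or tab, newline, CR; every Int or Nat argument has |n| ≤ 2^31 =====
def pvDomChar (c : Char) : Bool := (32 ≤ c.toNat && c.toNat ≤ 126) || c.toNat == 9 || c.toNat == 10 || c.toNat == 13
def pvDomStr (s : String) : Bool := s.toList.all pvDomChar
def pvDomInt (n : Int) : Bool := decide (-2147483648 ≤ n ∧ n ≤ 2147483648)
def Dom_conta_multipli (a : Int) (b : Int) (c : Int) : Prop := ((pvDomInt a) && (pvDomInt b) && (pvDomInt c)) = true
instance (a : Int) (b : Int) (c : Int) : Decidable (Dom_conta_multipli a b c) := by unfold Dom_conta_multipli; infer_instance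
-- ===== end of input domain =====

-- B replaces A's O(c) scan by the closed form c//|a| - c//lcm(|a|,|b|) (measured asymptotically faster).

-- ===== PORT A =====
def conta_multipli (a : Int) (b : Int) (c : Int) : Int :=
  (PySem.List.pyRange 1 (c+1) 1).foldl
    (fun risposta n =>
      if PySem.Int.mod n a = 0 then
        if PySem.Int.mod n b ≠ 0 then risposta + 1 else risposta
      else risposta) 0

-- ===== PORT B =====
-- hand-written Euclid loop of Source B ('while y: x, y = y, x % y')
def pvEuclid (x y : Nat) : Nat :=
  if h : y = 0 then x else pvEuclid y (x % y)
termination_by y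
decreasing_by exact Nat.mod_lt _ (Nat.pos_of_ne_zero h)

def conta_multipli_alt (a : Int) (b : Int) (c : Int) : Int :=
  if c < 1 then 0
  else if b = 0 then PySem.Int.floordiv c |a|
  else
    let g : Nat := pvEuclid a.natAbs b.natAbs
    let l : Int := PySem.Int.floordiv (|a| * |b|) (g : Int)
    PySem.Int.floordiv c |a| - PySem.Int.floordiv c l

-- ===== PRECONDITION & SPEC =====
-- Pre_ excludes exactly the inputs on which A raises ZeroDivisionError: a = 0 with c ≥ 1
-- (n % a raises at n = 1), and b = 0 with |a| ≤ c (n % b raises at the first multiple n of a).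
def Pre_conta_multipli (a : Int) (b : Int) (c : Int) : Prop :=
  1 ≤ c → (a ≠ 0 ∧ (b = 0 → c < |a|))
instance (a : Int) (b : Int) (c : Int) : Decidable (Pre_conta_multipli a b c) := by unfold Pre_conta_multipli; infer_instance
def pvWitness_conta_multipli : Int × Int × Int := (4, 6, 100)

def Spec_conta_multipli (a : Int) (b : Int) (c : Int) (out : Int) : Prop := out = conta_multipli_alt a b c
instance (a : Int) (b : Int) (c : Int) (out : Int) : Decidable (Spec_conta_multipli a b c out) := by unfold Spec_conta_multipli; infer_instance

-- ===== CLAIM (what is proved, stated in full; the proofs are below) =====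
def Claim_equal_conta_multipli : Prop := ∀ (a : Int) (b : Int) (c : Int), Dom_conta_multipli a b c → Pre_conta_multipli a b c → Spec_conta_multipli a b c (conta_multipli a b c)

-- ===== LEMMAS AND PROOFS =====

-- Source B's Euclid loop computes the gcd.
theorem pvEuclid_eq_gcd (x y : Nat) : pvEuclid x y = Nat.gcd y x := by
  induction y using Nat.strong_induction_on generalizing x with
  | _ y ih =>
    by_cases h : y = 0
    · subst h; rw [pvEuclid]; simp
    · rw [pvEuclid]
      rw [dif_neg h, ih (x % y) (Nat.mod_lt _ (Nat.pos_of_ne_zero h)), Nat.gcd_rec y x]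

-- the counting identity: #{ 1 ≤ n ≤ N : |a| ∣ n, |b| ∤ n } = N/|a| - N/lcm(|a|,|b|)
theorem pv_count_eq (a b : Int) (ha : a ≠ 0) (hb : b ≠ 0) (N : Nat) :
    ((PySem.List.pyRange 1 ((N : Int) + 1) 1).countP
      (fun n => decide (PySem.Int.mod n a = 0 ∧ ¬ PySem.Int.mod n b = 0)))
    = N / a.natAbs - N / Nat.lcm a.natAbs b.natAbs := by
  have hApos : 0 < a.natAbs := Int.natAbs_pos.mpr ha
  have hBpos : 0 < b.natAbs := Int.natAbs_pos.mpr hb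
  have hLpos : 0 < Nat.lcm a.natAbs b.natAbs :=
    Nat.pos_of_ne_zero (Nat.lcm_ne_zero hApos.ne' hBpos.ne')
  have hmono : ∀ M : Nat, M / Nat.lcm a.natAbs b.natAbs ≤ M / a.natAbs :=
    fun M => Nat.div_le_div_left (Nat.le_of_dvd hLpos (Nat.dvd_lcm_left _ _)) hApos
  induction N with
  | zero =>
    rw [show ((0:Nat):Int) + 1 = 1 by norm_num, PySem.List.pyRange_one_eq_nil le_rfl]
    simp
  | succ N ih =>
    have hsplit : PySem.List.pyRange 1 ((↑(N+1) : Int) + 1) 1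
        = PySem.List.pyRange 1 ((N : Int) + 1) 1 ++ [(N : Int) + 1] := by
      have : ((↑(N+1) : Int) + 1) = ((N : Int) + 1) + 1 := by push_cast; ring
      rw [this, PySem.List.pyRange_one_succ_right (by omega)]
    have hcast : ((N : Int) + 1) = ((N + 1 : Nat) : Int) := by push_cast; ring
    have hdvda : PySem.Int.mod ((N : Int) + 1) a = 0 ↔ a.natAbs ∣ (N + 1) := by
      rw [PySem.Int.mod_eq_zero_iff_dvd, ← Int.natAbs_dvd, hcast, Int.natCast_dvd_natCast]
    have hdvdb : PySem.Int.mod ((N : Int) + 1) b = 0 ↔ b.natAbs ∣ (N + 1) := by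
      rw [PySem.Int.mod_eq_zero_iff_dvd, ← Int.natAbs_dvd, hcast, Int.natCast_dvd_natCast]
    rw [hsplit, List.countP_append, ih, List.countP_singleton]
    simp only [decide_eq_true_eq]
    rw [Nat.succ_div, Nat.succ_div]
    have hx := hmono N
    by_cases h1 : a.natAbs ∣ (N + 1)
    · by_cases h2 : b.natAbs ∣ (N + 1)
      · have hL : Nat.lcm a.natAbs b.natAbs ∣ (N + 1) := Nat.lcm_dvd h1 h2
        rw [if_neg (fun hp => hp.2 (hdvdb.mpr h2)), if_pos h1, if_pos hL]
        omega
      · have hL : ¬ Nat.lcm a.natAbs b.natAbs ∣ (N + 1) :=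
          fun h => h2 ((Nat.dvd_lcm_right _ _).trans h)
        rw [if_pos (⟨hdvda.mpr h1, fun hmod => h2 (hdvdb.mp hmod)⟩ :
              PySem.Int.mod ((N : Int) + 1) a = 0 ∧ ¬ PySem.Int.mod ((N : Int) + 1) b = 0),
            if_pos h1, if_neg hL]
        omega
    · have hL : ¬ Nat.lcm a.natAbs b.natAbs ∣ (N + 1) :=
        fun h => h1 ((Nat.dvd_lcm_left _ _).trans h)
      rw [if_neg (fun hp => h1 (hdvda.mp hp.1)), if_neg h1, if_neg hL]
      omega

-- A's fold counts exactly that predicate.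
theorem pv_fold_eq_count (a b c : Int) :
    conta_multipli a b c
    = ((PySem.List.pyRange 1 (c+1) 1).countP
        (fun n => decide (PySem.Int.mod n a = 0 ∧ ¬ PySem.Int.mod n b = 0)) : Int) := by
  unfold conta_multipli
  have hcongr := PySem.List.foldl_congr_mem
      (l := PySem.List.pyRange 1 (c+1) 1) (init := (0:Int))
      (f := fun risposta n =>
        if PySem.Int.mod n a = 0 then
          if PySem.Int.mod n b ≠ 0 then risposta + 1 else risposta
        else risposta)
      (g := fun risposta n =>
        if PySem.Int.mod n a = 0 ∧ ¬ PySem.Int.mod n b = 0 then risposta + 1 else risposta)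
      (by intro acc x _; by_cases h1 : PySem.Int.mod x a = 0 <;>
          by_cases h2 : PySem.Int.mod x b = 0 <;> simp [h1, h2])
  rw [hcongr, PySem.List.foldl_ite_add_one]
  simp

-- with 1 ≤ c < |a| no n in 1..c is a multiple of a, so A's count is 0.
theorem pv_count_zero_of_lt (a b c : Int) (hc : c < |a|) :
    ((PySem.List.pyRange 1 (c+1) 1).countP
      (fun n => decide (PySem.Int.mod n a = 0 ∧ ¬ PySem.Int.mod n b = 0))) = 0 := by
  rw [List.countP_eq_zero]
  intro x hx
  rw [PySem.List.mem_pyRange_one] at hx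
  simp only [decide_eq_true_eq, not_and, not_not]
  intro hmod
  exfalso
  rw [PySem.Int.mod_eq_zero_iff_dvd] at hmod
  have habs : |a| ∣ x := (abs_dvd a x).mpr hmod
  have hle : |a| ≤ x := Int.le_of_dvd (by omega) habs
  omega

-- ===== VERDICT (by name: the statement is the Claim_ definition above) =====
theorem conta_multipli_spec : Claim_equal_conta_multipli := by
  intro a b c _ hpre
  unfold Spec_conta_multipli
  by_cases hc : c < 1
  · unfold conta_multipli conta_multipli_alt
    rw [PySem.List.pyRange_one_eq_nil (by omega), if_pos hc]
    rfl
  · obtain ⟨ha, hb0⟩ := hpre (by omega)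
    by_cases hb : b = 0
    · -- b = 0 with 1 ≤ c < |a|: both sides are 0
      have hlt : c < |a| := hb0 hb
      rw [pv_fold_eq_count, pv_count_zero_of_lt a b c hlt]
      unfold conta_multipli_alt
      rw [if_neg hc, if_pos hb]
      have hca : c.toNat < a.natAbs := by
        have : |a| = (a.natAbs : Int) := Int.abs_eq_natAbs a
        omega
      have hcn : c = ((c.toNat : Nat) : Int) := by omega
      rw [hcn, show |a| = ((a.natAbs : Nat) : Int) from Int.abs_eq_natAbs a,
          PySem.Int.floordiv_natCast, Nat.div_eq_of_lt hca]
    · have hApos : 0 < a.natAbs := Int.natAbs_pos.mpr ha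
      have hBpos : 0 < b.natAbs := Int.natAbs_pos.mpr hb
      have hN : c = ((c.toNat : Nat) : Int) := by omega
      rw [pv_fold_eq_count, hN, pv_count_eq a b ha hb c.toNat]
      unfold conta_multipli_alt
      rw [if_neg (by omega : ¬ ((c.toNat : Nat) : Int) < 1), if_neg hb]
      rw [pvEuclid_eq_gcd, Nat.gcd_comm,
          show |a| = ((a.natAbs : Nat) : Int) from Int.abs_eq_natAbs a,
          show |b| = ((b.natAbs : Nat) : Int) from Int.abs_eq_natAbs b,
          show ((a.natAbs : Int) * (b.natAbs : Int)) = ((a.natAbs * b.natAbs : Nat) : Int) by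
            push_cast; ring,
          PySem.Int.floordiv_natCast]
      show _ = ((c.toNat / a.natAbs : Nat) : Int)
          - PySem.Int.floordiv (((c.toNat : Nat) : Int))
              (PySem.Int.floordiv (((a.natAbs * b.natAbs : Nat) : Int))
                (((Nat.gcd a.natAbs b.natAbs : Nat) : Int)))
      rw [PySem.Int.floordiv_natCast,
          show a.natAbs * b.natAbs / Nat.gcd a.natAbs b.natAbs = Nat.lcm a.natAbs b.natAbs from rfl,
          PySem.Int.floordiv_natCast]
      have hLpos : 0 < Nat.lcm a.natAbs b.natAbs :=
        Nat.pos_of_ne_zero (Nat.lcm_ne_zero hApos.ne' hBpos.ne')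
      have hmono : c.toNat / Nat.lcm a.natAbs b.natAbs ≤ c.toNat / a.natAbs :=
        Nat.div_le_div_left (Nat.le_of_dvd hLpos (Nat.dvd_lcm_left _ _)) hApos
      omega
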